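-- pv_equiv track=rewrite | github.com/0Bu/advent-of-code-2018 | day02.py | get_checksum
-- ===== SOURCE A (Python) =====
-- def get_variance(box_id):
--     d = dict.fromkeys(set(box_id), 0)
--     for c in box_id:
--         d[c] += 1
--     return d
--
-- def get_checksum(box_ids):
--     twice, thrice = (0, 0)
--     for box_id in box_ids:
--         frequencies = get_variance(box_id).values()
--         if 2 in frequencies:
--             twice += 1
--         if 3 in frequencies:
--             thrice += 1
--     return twice * thrice
-- ===== SOURCE B (Python) =====
-- def _multiplicities(chars):
--     # peel off every copy of the first character, record how many were removed, recurse
--     if not chars: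
--         return []
--     rest = [c for c in chars if c != chars[0]]
--     return [len(chars) - len(rest)] + _multiplicities(rest)
--
-- def get_checksum(box_ids):
--     ms = [_multiplicities(list(box_id)) for box_id in box_ids]
--     twice = sum(2 in m for m in ms)
--     thrice = sum(3 in m for m in ms)
--     return twice * thrice
-- ===== Notes on version B (the rewrite author's own statement) =====
-- stated objective: alternative
-- what changed: Replaces A's per-id hash frequency dict and single two-accumulator loop with a recursive delete-and-count elimination (repeatedly filter out all copies of the first character and record how many disappeared) followed by two staged sum passes whose product is returned.
import Mathlib
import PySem

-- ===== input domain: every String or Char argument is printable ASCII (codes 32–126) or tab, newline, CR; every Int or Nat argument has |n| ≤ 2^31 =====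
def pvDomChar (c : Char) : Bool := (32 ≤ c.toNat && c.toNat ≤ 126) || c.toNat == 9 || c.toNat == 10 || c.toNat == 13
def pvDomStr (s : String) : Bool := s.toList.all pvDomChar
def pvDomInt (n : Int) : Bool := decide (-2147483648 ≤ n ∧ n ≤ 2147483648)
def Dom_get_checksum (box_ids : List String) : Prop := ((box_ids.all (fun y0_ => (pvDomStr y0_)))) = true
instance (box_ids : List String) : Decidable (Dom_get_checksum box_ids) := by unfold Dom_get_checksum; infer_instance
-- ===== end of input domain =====

-- B replaces A's per-id frequency dict and two-accumulator loop with a recursive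
-- delete-and-count elimination of one distinct letter at a time plus two staged sum
-- passes (objective: alternative; same value, differently-shaped computation).

-- ===== PORT A =====
-- dict.fromkeys iterates set(box_id): Python's set hash order is not modelled, but the dict's
-- values are consumed only through membership tests below, which do not depend on that order.
def get_variance (box_id : String) : PySem.Dict Char Int :=
  let d := (PySem.Set.ofList box_id.toList).foldl (fun d c => d.insert c (0 : Int)) PySem.Dict.empty
  box_id.toList.foldl (fun d c => d.modify c 0 (· + 1)) d

def get_checksum (box_ids : List String) : Int :=
  let p := box_ids.foldl (fun (tt : Int × Int) box_id =>
      let frequencies := (get_variance box_id).values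
      ((if (2 : Int) ∈ frequencies then tt.1 + 1 else tt.1),
       (if (3 : Int) ∈ frequencies then tt.2 + 1 else tt.2))) ((0 : Int), (0 : Int))
  p.1 * p.2

-- ===== PORT B =====
-- _multiplicities: remove every copy of the first character, record how many disappeared, recurse
def pvMults : List Char → List Int
  | [] => []
  | c :: rest0 =>
      ((((c :: rest0).length : Int) - ((c :: rest0).filter (fun x => x ≠ c)).length) ::
        pvMults ((c :: rest0).filter (fun x => x ≠ c)))
  termination_by l => l.length
  decreasing_by
    exact Nat.lt_succ_of_le (by simpa using List.length_filter_le (fun x => decide (x ≠ c)) rest0)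

def get_checksum_alt (box_ids : List String) : Int :=
  let ms := box_ids.map (fun box_id => pvMults box_id.toList)
  let twice := ms.foldl (fun acc m => acc + (if (2 : Int) ∈ m then 1 else 0)) (0 : Int)
  let thrice := ms.foldl (fun acc m => acc + (if (3 : Int) ∈ m then 1 else 0)) (0 : Int)
  twice * thrice

-- ===== PRECONDITION & SPEC =====
def Spec_get_checksum (box_ids : List String) (out : Int) : Prop := out = get_checksum_alt box_ids
instance (box_ids : List String) (out : Int) : Decidable (Spec_get_checksum box_ids out) := by unfold Spec_get_checksum; infer_instance

-- ===== CLAIM (what is proved, stated in full; the proofs are below) =====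
def Claim_equal_get_checksum : Prop := ∀ (box_ids : List String), Dom_get_checksum box_ids → Spec_get_checksum box_ids (get_checksum box_ids)

-- ===== LEMMAS AND PROOFS =====

-- A's dict values are exactly the multiplicities of the distinct characters.
lemma variance_values (s : String) :
    (get_variance s).values
      = (PySem.Set.ofList s.toList).map (fun c => (s.toList.count c : Int)) := by
  unfold get_variance
  set l := s.toList with hl
  set d0 := (PySem.Set.ofList l).foldl (fun d c => d.insert c (0 : Int)) PySem.Dict.empty with hd0
  have hitems0 : d0.items = (PySem.Set.ofList l).map (fun c => (c, (0 : Int))) := by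
    have := PySem.Dict.items_foldl_insert_fresh (PySem.Set.ofList l) (fun a => a)
      (fun _ => (0 : Int)) PySem.Dict.empty
      (by intro a _; simp [PySem.Dict.contains_empty])
      (by simp)
    simpa using this
  have hkeys0 : d0.keys = PySem.Set.ofList l := by
    simp [PySem.Dict.keys, hitems0, Function.comp_def]
  set df := l.foldl (fun d c => d.modify c 0 (· + 1)) d0 with hdf
  have hkeysf : df.keys = PySem.Set.ofList l := by
    have := PySem.Dict.keys_foldl_modify l (0 : Int) (fun _ _ => (· + 1)) d0
    rw [hdf, this, hkeys0, PySem.Set.update_eq_append_filter]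
    have hfil : List.filter (fun y => !(PySem.Set.ofList l).contains y) (PySem.Set.ofList l) = [] := by
      apply List.filter_eq_nil_iff.mpr
      intro a ha
      simp
      exact (PySem.Set.mem_ofList l a).mp ha
    rw [hfil, List.append_nil]
  have hnodupf : df.keys.Nodup := by rw [hkeysf]; exact PySem.Set.nodup_ofList l
  have hget0 : ∀ c ∈ PySem.Set.ofList l, d0.getD c 0 = 0 := by
    intro c hc
    refine PySem.Dict.getD_of_mem_items d0 ?_ ?_ 0
    · rw [hitems0]; exact List.mem_map.mpr ⟨c, hc, rfl⟩
    · rw [hkeys0]; exact PySem.Set.nodup_ofList l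
  have hgetf : ∀ c ∈ PySem.Set.ofList l, df.getD c 0 = (l.count c : Int) := by
    intro c hc
    rw [hdf, PySem.Dict.getD_foldl_modify_add_one, hget0 c hc, zero_add]
  rw [PySem.Dict.values_eq_map_keys df hnodupf 0, hkeysf]
  exact List.map_congr_left hgetf

lemma mem_values_variance (s : String) (n : Int) :
    n ∈ (get_variance s).values ↔ ∃ c ∈ s.toList, (s.toList.count c : Int) = n := by
  rw [variance_values]
  simp [List.mem_map, PySem.Set.mem_ofList]

-- count of c plus the length of the c-free remainder is the whole length
lemma count_add_filter_length (l : List Char) (c : Char) :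
    l.count c + (l.filter (fun x => x ≠ c)).length = l.length := by
  rw [← List.countP_eq_length_filter, List.count,
      List.length_eq_countP_add_countP (p := fun x => x == c)]
  congr 1
  apply List.countP_congr
  intro x _
  by_cases h : x = c <;> simp [h]

-- B's multiplicity list contains exactly the multiplicities of the members
lemma mem_pvMults (l : List Char) (n : Int) :
    n ∈ pvMults l ↔ ∃ c ∈ l, (l.count c : Int) = n := by
  induction l using pvMults.induct with
  | case1 => simp [pvMults]
  | case2 c rest0 ih =>
    have hcnotin : c ∉ (c :: rest0).filter (fun x => x ≠ c) := by
      intro h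
      have := (List.mem_filter.mp h).2
      simp at this
    have hcount_other : ∀ d : Char, d ≠ c →
        ((c :: rest0).filter (fun x => x ≠ c)).count d = (c :: rest0).count d := by
      intro d hdc
      rw [List.count_filter]
      simp [hdc]
    have hlen : (((c :: rest0).length : Int) - (((c :: rest0).filter (fun x => x ≠ c)).length : Int))
        = ((c :: rest0).count c : Int) := by
      have := count_add_filter_length (c :: rest0) c
      omega
    rw [pvMults]
    constructor
    · intro hmem
      rcases List.mem_cons.mp hmem with h | h
      · exact ⟨c, List.mem_cons_self, by omega⟩
      · rcases ih.mp h with ⟨d, hd, hcnt⟩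
        have hdc : d ≠ c := fun h' => hcnotin (h' ▸ hd)
        exact ⟨d, (List.filter_sublist).subset hd, by rw [← hcount_other d hdc]; exact hcnt⟩
    · rintro ⟨d, hd, hcnt⟩
      by_cases hdc : d = c
      · subst hdc
        exact List.mem_cons.mpr (Or.inl (by omega))
      · apply List.mem_cons.mpr; right
        have hddrop : d ∈ (c :: rest0).filter (fun x => x ≠ c) :=
          List.mem_filter.mpr ⟨hd, by simp [hdc]⟩
        exact ih.mpr ⟨d, hddrop, by rw [hcount_other d hdc]; exact hcnt⟩

-- the per-id tests agree: n among A's dict values ↔ n among B's multiplicities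
lemma cond_eq (s : String) (n : Int) :
    (n ∈ (get_variance s).values) ↔ (n ∈ pvMults s.toList) := by
  rw [mem_values_variance, mem_pvMults]

-- A's pair loop counts, in each component, the ids passing the corresponding test
lemma fold_pair_count (l : List String) (a b : Int) :
    l.foldl (fun (tt : Int × Int) box_id =>
      ((if (2 : Int) ∈ (get_variance box_id).values then tt.1 + 1 else tt.1),
       (if (3 : Int) ∈ (get_variance box_id).values then tt.2 + 1 else tt.2))) (a, b)
    = (a + (l.countP (fun s => decide ((2 : Int) ∈ pvMults s.toList)) : Int),
       b + (l.countP (fun s => decide ((3 : Int) ∈ pvMults s.toList)) : Int)) := by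
  induction l generalizing a b with
  | nil => simp
  | cons s t ih =>
    simp only [List.foldl_cons, List.countP_cons, ih]
    rw [if_congr (cond_eq s 2) rfl rfl, if_congr (cond_eq s 3) rfl rfl]
    by_cases h2 : (2 : Int) ∈ pvMults s.toList <;>
      by_cases h3 : (3 : Int) ∈ pvMults s.toList <;>
        · simp only [h2, h3, if_true, if_false, decide_true, decide_false, Prod.mk.injEq,
            ]
          constructor <;> push_cast <;> ring

-- B's staged sum counts the ids whose multiplicity list contains k
lemma fold_sum_count (k : Int) (l : List String) (a : Int) :
    (l.map (fun box_id => pvMults box_id.toList)).foldl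
        (fun acc m => acc + (if k ∈ m then 1 else 0)) a
    = a + (l.countP (fun s => decide (k ∈ pvMults s.toList)) : Int) := by
  induction l generalizing a with
  | nil => simp
  | cons s t ih =>
    simp only [List.map_cons, List.foldl_cons, ih, List.countP_cons]
    by_cases h : k ∈ pvMults s.toList <;>
      · simp only [h, if_true, if_false, decide_true, decide_false]
        push_cast
        ring

-- ===== VERDICT (by name: the statement is the Claim_ definition above) =====
theorem get_checksum_spec : Claim_equal_get_checksum := by
  intro box_ids _
  unfold Spec_get_checksum
  simp only [get_checksum, get_checksum_alt]
  rw [fold_pair_count, fold_sum_count, fold_sum_count]
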